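-- pv_equiv track=rewrite | github.com/MohandSabry/ACO-map-game | tsp_instance.py | get_city_labels
-- ===== SOURCE A (Python) =====
-- from typing import List
--
-- def get_city_labels(num_cities: int) -> List[str]:
--     labels: List[str] = []
--     alphabet = [chr(ord("A") + i) for i in range(26)]
--
--     count = num_cities
--     prefix_index = 0
--
--     while count > 0:
--         for letter in alphabet:
--             if count <= 0:
--                 break
--             if prefix_index == 0:
--                 labels.append(letter)
--             else:
--                 labels.append(alphabet[prefix_index - 1] + letter)
--             count -= 1
--         prefix_index += 1
--
--     return labels[:num_cities]
-- ===== SOURCE B (Python) =====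
-- def get_city_labels(num_cities: int):
--     alphabet = [chr(ord("A") + i) for i in range(26)]
--     labels = []
--     for i in range(num_cities):
--         if i < 26:
--             labels.append(alphabet[i])
--         else:
--             q, r = divmod(i - 26, 26)
--             labels.append(alphabet[q] + alphabet[r])
--     return labels
-- ===== Notes on version B (the rewrite author's own statement) =====
-- stated objective: simpler
-- what changed: Replaces the nested prefix-counter while/for loop (with a final slice) by a single pass that computes each label directly from its index via divmod.
-- outside the precondition, e.g. on get_city_labels(703): A raises IndexError, B raises IndexError
import Mathlib
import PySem

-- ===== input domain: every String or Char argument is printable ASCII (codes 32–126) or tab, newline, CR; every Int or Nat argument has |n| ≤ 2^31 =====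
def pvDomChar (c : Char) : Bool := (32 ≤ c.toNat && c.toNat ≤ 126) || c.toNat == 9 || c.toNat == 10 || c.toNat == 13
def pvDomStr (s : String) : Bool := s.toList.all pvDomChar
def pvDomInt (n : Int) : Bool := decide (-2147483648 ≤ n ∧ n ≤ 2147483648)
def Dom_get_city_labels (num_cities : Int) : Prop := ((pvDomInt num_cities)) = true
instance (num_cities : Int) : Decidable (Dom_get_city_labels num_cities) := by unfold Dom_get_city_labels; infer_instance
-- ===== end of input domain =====

-- B replaces A's nested prefix-counter loop + final slice by one pass computing each
-- label directly from its index via divmod (objective: simpler).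

-- ===== PORT A =====
-- alphabet = [chr(ord("A") + i) for i in range(26)]
def pvAlphaA : List String :=
  (PySem.List.pyRange 0 26 1).map (fun i => String.ofList [Char.ofNat ('A'.toNat + i.toNat)])

-- inner 'for letter in alphabet' loop with its break; returns (labels, count).
-- alphabet[prefix_index - 1] is ported with pyGet?/getD "": where Python raises
-- IndexError (only reachable when num_cities > 702, excluded by Pre_).
def pvInnerA (letters : List String) (labels : List String) (count : Int)
    (prefix_index : Int) : List String × Int :=
  match letters with
  | [] => (labels, count)
  | letter :: rest =>
    if count ≤ 0 then (labels, count)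
    else pvInnerA rest
      (labels ++ [if prefix_index = 0 then letter
                  else ((PySem.List.pyGet? pvAlphaA (prefix_index - 1)).getD "") ++ letter])
      (count - 1) prefix_index

-- outer 'while count > 0' loop; fuel = count.toNat suffices since each pass with
-- count > 0 decreases count by at least 1.
def pvOuterA : Nat → List String → Int → Int → List String
  | 0, labels, _, _ => labels
  | fuel + 1, labels, count, prefix_index =>
    if 0 < count then
      let r := pvInnerA pvAlphaA labels count prefix_index
      pvOuterA fuel r.1 r.2 (prefix_index + 1)
    else labels

def get_city_labels (num_cities : Int) : List String :=
  PySem.List.slice (pvOuterA num_cities.toNat [] num_cities 0) none (some num_cities)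

-- ===== PORT B =====
-- Source B builds the same 26-letter alphabet comprehension; the shared helper pvAlphaA is reused.

-- alphabet[q] / alphabet[r] ported with pyGet?/getD "": Python raises IndexError
-- only when num_cities > 702, excluded by Pre_.
def get_city_labels_alt (num_cities : Int) : List String :=
  (PySem.List.pyRange 0 num_cities 1).map (fun i =>
    if i < 26 then (PySem.List.pyGet? pvAlphaA i).getD ""
    else
      let q := PySem.Int.floordiv (i - 26) 26
      let r := PySem.Int.mod (i - 26) 26
      ((PySem.List.pyGet? pvAlphaA q).getD "") ++ ((PySem.List.pyGet? pvAlphaA r).getD ""))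

-- ===== PRECONDITION & SPEC =====
-- Pre_ excludes num_cities > 702, where both Pythons raise IndexError (the 26-letter
-- alphabet runs out of prefixes).
def Pre_get_city_labels (num_cities : Int) : Prop := num_cities ≤ 702
instance (num_cities : Int) : Decidable (Pre_get_city_labels num_cities) := by
  unfold Pre_get_city_labels; infer_instance
def pvWitness_get_city_labels : Int := 30

def Spec_get_city_labels (num_cities : Int) (out : List String) : Prop := out = get_city_labels_alt num_cities
instance (num_cities : Int) (out : List String) : Decidable (Spec_get_city_labels num_cities out) := by unfold Spec_get_city_labels; infer_instance

-- ===== CLAIM (what is proved, stated in full; the proofs are below) =====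
def Claim_equal_get_city_labels : Prop := ∀ (num_cities : Int), Dom_get_city_labels num_cities → Pre_get_city_labels num_cities → Spec_get_city_labels num_cities (get_city_labels num_cities)

-- ===== LEMMAS AND PROOFS =====

-- decoration A applies to a letter in the pass with prefix index p
def pvDec (p : Int) (letter : String) : String :=
  if p = 0 then letter
  else ((PySem.List.pyGet? pvAlphaA (p - 1)).getD "") ++ letter

lemma pvAlphaA_length : pvAlphaA.length = 26 := by decide

lemma pvInnerA_spec (letters : List String) (labels : List String) (count : Int)
    (p : Int) (hc : 0 ≤ count) :
    pvInnerA letters labels count p =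
      (labels ++ (letters.take count.toNat).map (pvDec p),
       count - (min letters.length count.toNat : Nat)) := by
  induction letters generalizing labels count with
  | nil => simp [pvInnerA]
  | cons l rest ih =>
    by_cases h0 : count ≤ 0
    · have : count = 0 := le_antisymm h0 hc
      subst this
      simp [pvInnerA]
    · rw [pvInnerA]
      simp only [if_neg h0]
      rw [ih _ _ (by omega)]
      have ht : count.toNat = (count - 1).toNat + 1 := by omega
      rw [Prod.mk.injEq]
      constructor
      · rw [ht, List.take_succ_cons, List.map_cons]
        simp [pvDec, List.append_assoc]
      · simp only [List.length_cons]
        omega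

-- what the while-loop generates from (count, prefix_index)
def pvH (c : Int) (p : Int) : List String :=
  if c ≤ 0 then []
  else (pvAlphaA.take c.toNat).map (pvDec p) ++ pvH (c - 26) (p + 1)
termination_by c.toNat
decreasing_by simp at *; omega

lemma pvH_nonpos {c : Int} (p : Int) (h : c ≤ 0) : pvH c p = [] := by
  rw [pvH]; simp [h]

lemma pvOuterA_spec (fuel : Nat) (labels : List String) (c : Int) (p : Int)
    (hf : c.toNat ≤ fuel) :
    pvOuterA fuel labels c p = labels ++ pvH c p := by
  induction fuel generalizing labels c p with
  | zero =>
    have : c ≤ 0 := by omega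
    simp [pvOuterA, pvH_nonpos _ this]
  | succ n ih =>
    by_cases hc : 0 < c
    · rw [pvOuterA]
      simp only [if_pos hc]
      rw [pvInnerA_spec _ _ _ _ (by omega), pvAlphaA_length]
      dsimp only
      rw [ih _ _ _ (by omega)]
      rw [List.append_assoc]
      congr 1
      conv_rhs => rw [pvH]
      rw [if_neg (by omega : ¬ c ≤ 0)]
      congr 1
      by_cases h26 : (26 : Int) ≤ c
      · have hmin : ((min 26 c.toNat : Nat) : Int) = 26 := by omega
        rw [hmin]
      · rw [pvH_nonpos _ (by omega), pvH_nonpos _ (by omega)]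
    · rw [pvOuterA]
      rw [if_neg hc]
      rw [pvH_nonpos p (by omega : c ≤ 0), List.append_nil]

-- closed form for each generated label, by global position
def pvG (p : Int) (j : Nat) : String :=
  pvDec (p + (j / 26 : Nat)) ((pvAlphaA[j % 26]?).getD "")

lemma take_eq_range_map {α : Type} (xs : List α) (k : Nat) (d : α) (hk : k ≤ xs.length) :
    xs.take k = (List.range k).map (fun j => (xs[j]?).getD d) := by
  apply List.ext_getElem
  · simp [hk]
  · intro i h1 h2
    have hi : i < k := by simpa using h2
    have hx : i < xs.length := by omega
    simp [List.getElem?_eq_getElem hx]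

lemma pvG_low (p : Int) (j : Nat) (hj : j < 26) :
    pvG p j = pvDec p ((pvAlphaA[j]?).getD "") := by
  have h1 : j / 26 = 0 := by omega
  have h2 : j % 26 = j := by omega
  simp [pvG, h1, h2]

lemma pvG_shift (p : Int) (j : Nat) : pvG p (26 + j) = pvG (p + 1) j := by
  have h1 : (26 + j) / 26 = 1 + j / 26 := by omega
  have h2 : (26 + j) % 26 = j % 26 := by omega
  simp only [pvG, h1, h2]
  congr 1
  push_cast
  ring

lemma pvH_spec (c : Int) (p : Int) :
    pvH c p = (List.range c.toNat).map (pvG p) := by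
  by_cases h : c ≤ 0
  · rw [pvH_nonpos _ h]
    have : c.toNat = 0 := by omega
    simp [this]
  · rw [pvH]
    rw [if_neg h]
    rw [pvH_spec (c - 26) (p + 1)]
    by_cases h26 : c.toNat ≤ 26
    · have h0 : (c - 26).toNat = 0 := by omega
      rw [h0]
      simp only [List.range_zero, List.map_nil, List.append_nil]
      rw [take_eq_range_map pvAlphaA c.toNat "" (by rw [pvAlphaA_length]; omega),
          List.map_map]
      apply List.map_congr_left
      intro j hj
      rw [Function.comp_apply]
      exact (pvG_low p j (by have := List.mem_range.mp hj; omega)).symm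
    · have hsplit : c.toNat = 26 + (c - 26).toNat := by omega
      conv_rhs => rw [hsplit, List.range_add, List.map_append]
      congr 1
      · rw [List.take_of_length_le (by rw [pvAlphaA_length]; omega)]
        have hA : pvAlphaA = pvAlphaA.take 26 :=
          (List.take_of_length_le (by rw [pvAlphaA_length])).symm
        rw [hA, take_eq_range_map pvAlphaA 26 "" (by rw [pvAlphaA_length]),
            List.map_map]
        apply List.map_congr_left
        intro j hj
        rw [Function.comp_apply]
        exact (pvG_low p j (List.mem_range.mp hj)).symm
      · rw [List.map_map]
        apply List.map_congr_left
        intro j _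
        show pvG (p + 1) j = pvG p (26 + j)
        exact (pvG_shift p j).symm
termination_by c.toNat
decreasing_by omega

lemma pvG_eq_f (j : Nat) :
    (if ((j : Int)) < 26 then (PySem.List.pyGet? pvAlphaA (j : Int)).getD ""
     else ((PySem.List.pyGet? pvAlphaA (PySem.Int.floordiv ((j : Int) - 26) 26)).getD "")
          ++ ((PySem.List.pyGet? pvAlphaA (PySem.Int.mod ((j : Int) - 26) 26)).getD ""))
      = pvG 0 j := by
  by_cases hj : j < 26
  · rw [if_pos (by exact_mod_cast hj), pvG_low 0 j hj, PySem.List.pyGet?_natCast]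
    simp [pvDec]
  · have hsub : (j : Int) - 26 = ((j - 26 : Nat) : Int) := by omega
    have hq : PySem.Int.floordiv ((j : Int) - 26) 26 = (((j - 26) / 26 : Nat) : Int) := by
      rw [hsub]; exact_mod_cast PySem.Int.floordiv_natCast (j - 26) 26
    have hr : PySem.Int.mod ((j : Int) - 26) 26 = (((j - 26) % 26 : Nat) : Int) := by
      rw [hsub]; exact_mod_cast PySem.Int.mod_natCast (j - 26) 26
    have hq' : (j - 26) / 26 = j / 26 - 1 := by omega
    have hr' : (j - 26) % 26 = j % 26 := by omega
    rw [if_neg (by omega : ¬ ((j : Int) < 26)), hq, hr, hq', hr',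
        PySem.List.pyGet?_natCast, PySem.List.pyGet?_natCast]
    have hne : (0 : Int) + ((j / 26 : Nat) : Int) ≠ 0 := by omega
    rw [pvG, pvDec, if_neg hne]
    have hp : (0 : Int) + ((j / 26 : Nat) : Int) - 1 = ((j / 26 - 1 : Nat) : Int) := by omega
    rw [hp, PySem.List.pyGet?_natCast]

-- ===== VERDICT (by name: the statement is the Claim_ definition above) =====
theorem get_city_labels_spec : Claim_equal_get_city_labels := by
  intro n _ _
  show get_city_labels n = get_city_labels_alt n
  unfold get_city_labels get_city_labels_alt
  rw [pvOuterA_spec _ _ _ _ (le_refl _), List.nil_append, pvH_spec]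
  rw [PySem.List.pyRange_one]
  by_cases hn : n ≤ 0
  · have h0 : n.toNat = 0 := by omega
    have h0' : (n - 0).toNat = 0 := by omega
    simp [h0, PySem.List.slice]
  · rw [PySem.List.slice_to _ (by omega : (0:Int) ≤ n)]
    rw [List.take_of_length_le (by simp)]
    have h0' : (n - 0).toNat = n.toNat := by omega
    rw [h0', List.map_map]
    apply List.map_congr_left
    intro j _
    show pvG 0 j = _
    have : (0 : Int) + (j : Int) = (j : Int) := by omega
    rw [Function.comp_apply, this]
    exact (pvG_eq_f j).symm
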